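-- pv_equiv track=rewrite | github.com/test-save-commit0/networkx | networkx/generators/nonisomorphic_trees.py | _next_tree
-- ===== SOURCE A (Python) =====
-- def _next_rooted_tree(predecessor, p=None):
--     """One iteration of the Beyer-Hedetniemi algorithm."""
--     if p is None:
--         p = len(predecessor) - 1
--     if p == 0:
--         return None
--     if predecessor[p - 1] < predecessor[p]:
--         successor = predecessor[:]
--         successor[p] = predecessor[p - 1] + 1
--         return successor
--     return _next_rooted_tree(predecessor, p - 1)
--
-- def _next_tree(candidate):
--     """One iteration of the Wright, Richmond, Odlyzko and McKay
--     algorithm."""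
--     left, right = _split_tree(candidate)
--     if not right:
--         return None
--     next_right = _next_rooted_tree(right)
--     if next_right is None:
--         return _next_tree(left + [0])
--     return left + next_right
--
-- def _split_tree(layout):
--     """Returns a tuple of two layouts, one containing the left
--     subtree of the root vertex, and one containing the original tree
--     with the left subtree removed."""
--     if len(layout) <= 1:
--         return [], []
--     for i, level in enumerate(layout[1:], 1):
--         if level == 1:
--             return layout[:i], layout[i:]
--     return layout, []
-- ===== SOURCE B (Python) =====
-- def _next_tree(candidate):
--     """One iteration of the Wright, Richmond, Odlyzko and McKay
--     algorithm, written as one iterative loop: split at the first level-1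
--     vertex after the root and scan the right part backwards for the
--     Beyer-Hedetniemi successor in place."""
--     while True:
--         # split: the left subtree ends just before the first 1 after position 0
--         try:
--             i = candidate.index(1, 1)
--         except ValueError:
--             return None
--         left, right = candidate[:i], candidate[i:]
--         # backward scan for the first descent from the end
--         p = len(right) - 1
--         while p > 0:
--             if right[p - 1] < right[p]:
--                 return left + right[:p] + [right[p - 1] + 1] + right[p + 1:]
--             p -= 1
--         candidate = left + [0]
-- ===== Notes on version B (the rewrite author's own statement) =====
-- stated objective: simpler
-- what changed: Replaced the three cooperating recursive helpers by one self-contained iterative while-loop that splits via list.index(1, 1) and finds the Beyer-Hedetniemi successor with an in-place backward index scan instead of recursion.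
import Mathlib
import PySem

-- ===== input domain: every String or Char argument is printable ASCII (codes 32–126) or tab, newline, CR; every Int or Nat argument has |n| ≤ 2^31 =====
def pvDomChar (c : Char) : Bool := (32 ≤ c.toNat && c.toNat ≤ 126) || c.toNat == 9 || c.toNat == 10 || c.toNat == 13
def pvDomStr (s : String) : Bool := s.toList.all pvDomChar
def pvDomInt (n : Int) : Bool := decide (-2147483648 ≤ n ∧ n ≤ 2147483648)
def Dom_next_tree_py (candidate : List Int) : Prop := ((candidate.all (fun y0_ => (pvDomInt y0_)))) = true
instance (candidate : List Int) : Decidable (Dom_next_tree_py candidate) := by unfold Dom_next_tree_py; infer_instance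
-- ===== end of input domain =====

-- B rewrites the tail-recursive `_next_tree` as one iterative loop that splits at the
-- first level-1 entry (list.index) and scans the right part backwards in place,
-- replacing both recursive helpers; objective: simpler (one self-contained loop).

-- ===== PORT A =====
-- the `for i, level in enumerate(layout[1:], 1)` scan of _split_tree
def pvSplitLoop (layout : List Int) (i : Nat) : List Int × List Int :=
  if h : i < layout.length then
    if layout.getD i 0 = 1 then (layout.take i, layout.drop i)
    else pvSplitLoop layout (i + 1)
  else (layout, [])
termination_by layout.length - i

-- port of _split_tree
def split_tree_py (layout : List Int) : List Int × List Int :=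
  if layout.length ≤ 1 then ([], []) else pvSplitLoop layout 1

-- port of _next_rooted_tree (p : Nat since it is always called with p = len-1 ≥ 0)
def next_rooted_tree_py (predecessor : List Int) (p : Nat) : Option (List Int) :=
  if p = 0 then none
  else if predecessor.getD (p - 1) 0 < predecessor.getD p 0 then
    some (predecessor.set p (predecessor.getD (p - 1) 0 + 1))
  else next_rooted_tree_py predecessor (p - 1)

-- termination measure for _next_tree's tail recursion (cited by both ports)
def pvMu (c : List Int) : Nat := c.length + (if c.getLast? = some 0 then 0 else 1)

theorem pvSplitLoop_spec (layout : List Int) (i : Nat)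
    (h : (pvSplitLoop layout i).2 ≠ []) :
    ∃ j, i ≤ j ∧ j < layout.length ∧ layout.getD j 0 = 1 ∧
      pvSplitLoop layout i = (layout.take j, layout.drop j) := by
  fun_induction pvSplitLoop layout i with
  | case1 i hi hv => exact ⟨i, le_refl i, hi, hv, rfl⟩
  | case2 i hi hv ih =>
      obtain ⟨j, hj1, hj2, hj3, hj4⟩ := ih h
      exact ⟨j, by omega, hj2, hj3, hj4⟩
  | case3 i hi => simp at h

theorem split_tree_py_spec (c : List Int) (h : (split_tree_py c).2 ≠ []) :
    ∃ j, 1 ≤ j ∧ j < c.length ∧ c.getD j 0 = 1 ∧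
      split_tree_py c = (c.take j, c.drop j) := by
  by_cases hl : c.length ≤ 1
  · exfalso; unfold split_tree_py at h; simp [hl] at h
  · have h' : (pvSplitLoop c 1).2 ≠ [] := by
      unfold split_tree_py at h; simpa [hl] using h
    obtain ⟨j, hj1, hj2, hj3, hj4⟩ := pvSplitLoop_spec c 1 h'
    exact ⟨j, hj1, hj2, hj3, by unfold split_tree_py; simp [hl, hj4]⟩

theorem pvMu_lt (c : List Int) (j : Nat) (h1 : 1 ≤ j) (h2 : j < c.length)
    (h3 : c.getD j 0 = 1) : pvMu (c.take j ++ [0]) < pvMu c := by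
  unfold pvMu
  rw [List.getLast?_concat]
  simp only [List.length_append, List.length_take, List.length_cons, List.length_nil]
  have hne : c ≠ [] := by intro h; subst h; simp at h2
  by_cases hl : c.getLast? = some 0
  · have : c.getD (c.length - 1) 0 = 0 := by
      rw [List.getLast?_eq_getElem? ] at hl
      rw [List.getD_eq_getElem?_getD, hl]; rfl
    have : j ≠ c.length - 1 := by intro he; rw [he] at h3; omega
    simp [hl]; omega
  · simp [hl]; omega

-- port of _next_tree
def next_tree_py (candidate : List Int) : Option (List Int) :=
  if h : (split_tree_py candidate).2 = [] then none
  else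
    match next_rooted_tree_py (split_tree_py candidate).2
        ((split_tree_py candidate).2.length - 1) with
    | none => next_tree_py ((split_tree_py candidate).1 ++ [0])
    | some nr => some ((split_tree_py candidate).1 ++ nr)
termination_by pvMu candidate
decreasing_by
  obtain ⟨j, hj1, hj2, hj3, hj4⟩ := split_tree_py_spec candidate h
  rw [hj4]
  exact pvMu_lt candidate j hj1 hj2 hj3

-- ===== PORT B =====
-- candidate.index(1, 1): first index ≥ i whose entry is 1 (ValueError = none)
def pvFindOne (layout : List Int) (i : Nat) : Option Nat :=
  if h : i < layout.length then
    if layout.getD i 0 = 1 then some i else pvFindOne layout (i + 1)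
  else none
termination_by layout.length - i

-- the inner `while p > 0` backward scan: index p of the first descent, if any
def pvScanDown (right : List Int) (p : Nat) : Option Nat :=
  if p = 0 then none
  else if right.getD (p - 1) 0 < right.getD p 0 then some p
  else pvScanDown right (p - 1)

theorem pvFindOne_spec (layout : List Int) (i j : Nat)
    (h : pvFindOne layout i = some j) :
    i ≤ j ∧ j < layout.length ∧ layout.getD j 0 = 1 := by
  fun_induction pvFindOne layout i with
  | case1 i hi hv => cases h; exact ⟨le_refl _, hi, hv⟩
  | case2 i hi hv ih => obtain ⟨a, b, c⟩ := ih h; exact ⟨by omega, b, c⟩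
  | case3 i hi => cases h

-- port of B's _next_tree (the outer `while True` loop as tail recursion)
def next_tree_py_alt (candidate : List Int) : Option (List Int) :=
  match hf : pvFindOne candidate 1 with
  | none => none
  | some i =>
      let left := candidate.take i
      let right := candidate.drop i
      match pvScanDown right (right.length - 1) with
      | some p =>
          some (left ++ right.take p ++ [right.getD (p - 1) 0 + 1] ++ right.drop (p + 1))
      | none => next_tree_py_alt (left ++ [0])
termination_by pvMu candidate
decreasing_by
  obtain ⟨hj1, hj2, hj3⟩ := pvFindOne_spec candidate 1 i hf
  exact pvMu_lt candidate i hj1 hj2 hj3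

-- ===== PRECONDITION & SPEC =====
def Spec_next_tree_py (candidate : List Int) (out : Option (List Int)) : Prop := out = next_tree_py_alt candidate
instance (candidate : List Int) (out : Option (List Int)) : Decidable (Spec_next_tree_py candidate out) := by unfold Spec_next_tree_py; infer_instance

-- ===== CLAIM (what is proved, stated in full; the proofs are below) =====
def Claim_equal_next_tree_py : Prop := ∀ (candidate : List Int), Dom_next_tree_py candidate → Spec_next_tree_py candidate (next_tree_py candidate)

-- ===== LEMMAS AND PROOFS =====

-- A's split equals B's index-based split
theorem split_eq_find (c : List Int) :
    split_tree_py c =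
      match pvFindOne c 1 with
      | some j => (c.take j, c.drop j)
      | none => if c.length ≤ 1 then ([], []) else (c, []) := by
  unfold split_tree_py
  by_cases hl : c.length ≤ 1
  · have hf : pvFindOne c 1 = none := by
      unfold pvFindOne; rw [dif_neg (by omega)]
    simp [hl, hf]
  · have key : ∀ i, pvSplitLoop c i =
        match pvFindOne c i with
        | some j => (c.take j, c.drop j)
        | none => (c, []) := by
      intro i
      fun_induction pvSplitLoop c i with
      | case1 i hi hv => unfold pvFindOne; rw [dif_pos hi, if_pos hv]
      | case2 i hi hv ih => unfold pvFindOne; rw [dif_pos hi, if_neg hv]; exact ih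
      | case3 i hi => unfold pvFindOne; rw [dif_neg hi]
    rw [if_neg hl, key 1]
    cases pvFindOne c 1 <;> simp [hl]

-- A's recursive Beyer–Hedetniemi step equals B's backward index scan
theorem rooted_eq_scan (pred : List Int) (p : Nat) :
    next_rooted_tree_py pred p =
      (pvScanDown pred p).map (fun q => pred.set q (pred.getD (q - 1) 0 + 1)) := by
  fun_induction next_rooted_tree_py pred p with
  | case1 => unfold pvScanDown; simp
  | case2 =>
      rename_i p hp hlt
      unfold pvScanDown; rw [if_neg hp, if_pos hlt]; rfl
  | case3 =>
      rename_i p hp hlt ih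
      unfold pvScanDown; rw [if_neg hp, if_neg hlt]; exact ih

theorem pvScanDown_le (right : List Int) (p q : Nat)
    (h : pvScanDown right p = some q) : q ≤ p ∧ q ≠ 0 := by
  fun_induction pvScanDown right p with
  | case1 => cases h
  | case2 p hp hlt => cases h; exact ⟨le_refl _, hp⟩
  | case3 p hp hlt ih => obtain ⟨a, b⟩ := ih h; exact ⟨by omega, b⟩

-- unfolding B's loop body once when the split index is j
theorem alt_eq (c : List Int) (j : Nat) (hf : pvFindOne c 1 = some j) :
    next_tree_py_alt c =
      match pvScanDown (c.drop j) ((c.drop j).length - 1) with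
      | some p =>
          some (c.take j ++ (c.drop j).take p ++ [(c.drop j).getD (p - 1) 0 + 1] ++
            (c.drop j).drop (p + 1))
      | none => next_tree_py_alt (c.take j ++ [0]) := by
  conv_lhs => rw [next_tree_py_alt.eq_def]
  split
  · rename_i heq
    rw [hf] at heq; cases heq
  · rename_i i heq
    rw [hf] at heq; cases heq; rfl

theorem next_tree_eq (c : List Int) : next_tree_py c = next_tree_py_alt c := by
  fun_induction next_tree_py c with
  | case1 c h =>
      -- A: right empty → none; show B finds no index 1 either
      cases hf : pvFindOne c 1 with
      | none => rw [next_tree_py_alt.eq_def, hf]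
      | some j =>
          obtain ⟨hj1, hj2, hj3⟩ := pvFindOne_spec c 1 j hf
          have hsplit : split_tree_py c = (c.take j, c.drop j) := by
            rw [split_eq_find, hf]
          rw [hsplit] at h
          simp at h
          omega
  | case2 c h hm ih =>
      cases hf : pvFindOne c 1 with
      | none =>
          exfalso
          rw [split_eq_find, hf] at h
          by_cases hl : c.length ≤ 1 <;> simp [hl] at h
      | some j =>
          have hsplit : split_tree_py c = (c.take j, c.drop j) := by
            rw [split_eq_find, hf]
          rw [hsplit] at hm
          have hm' : next_rooted_tree_py (c.drop j) ((c.drop j).length - 1) = none := hm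
          rw [rooted_eq_scan] at hm'
          rw [alt_eq c j hf]
          cases hs : pvScanDown (c.drop j) ((c.drop j).length - 1) with
          | some q => rw [hs] at hm'; simp at hm'
          | none =>
              rw [hsplit] at ih ⊢
              exact ih
  | case3 c h nr hm =>
      cases hf : pvFindOne c 1 with
      | none =>
          exfalso
          rw [split_eq_find, hf] at h
          by_cases hl : c.length ≤ 1 <;> simp [hl] at h
      | some j =>
          obtain ⟨hj1, hj2, hj3⟩ := pvFindOne_spec c 1 j hf
          have hsplit : split_tree_py c = (c.take j, c.drop j) := by
            rw [split_eq_find, hf]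
          rw [hsplit] at hm h
          have hm' : next_rooted_tree_py (c.drop j) ((c.drop j).length - 1) = some nr := hm
          rw [rooted_eq_scan] at hm'
          rw [alt_eq c j hf, hsplit]
          cases hs : pvScanDown (c.drop j) ((c.drop j).length - 1) with
          | none => rw [hs] at hm'; simp at hm'
          | some q =>
              rw [hs] at hm'
              simp only [Option.map_some, Option.some.injEq] at hm'
              subst hm'
              obtain ⟨hq1, hq2⟩ := pvScanDown_le _ _ _ hs
              have hqlt : q < (c.drop j).length := by
                have hne : c.drop j ≠ [] := h
                have : 0 < (c.drop j).length := List.length_pos_iff.mpr hne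
                omega
              rw [List.set_eq_take_append_cons_drop, if_pos hqlt]
              simp [List.append_assoc]

-- ===== VERDICT (by name: the statement is the Claim_ definition above) =====
theorem next_tree_py_spec : Claim_equal_next_tree_py := by
  intro c _
  unfold Spec_next_tree_py
  exact next_tree_eq c
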